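-- pv_equiv track=rewrite | github.com/MrBrantCode/unitest_baseline | mut_generate/mist_train_taco/taco_16767/solution.py | count_numbers_satisfying_condition
-- ===== SOURCE A (Python) =====
-- def count_numbers_satisfying_condition(N, K):
--     def sum_of_digits(num):
--         return sum(int(digit) for digit in str(num))
--
--     def condition_satisfied(num):
--         return num - sum_of_digits(num) >= K
--
--     count = 0
--     for num in range(1, N + 1):
--         if condition_satisfied(num):
--             count += 1
--
--     return count
-- ===== SOURCE B (Python) =====
-- def count_numbers_satisfying_condition(N, K):
--     def digit_sum(n):
--         s = 0
--         while n > 0: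
--             s += n % 10
--             n //= 10
--         return s
--
--     if N < 1:
--         return 0
--     # n - digit_sum(n) is monotone non-decreasing, so binary-search the
--     # first num in [1, N] satisfying the condition; all later ones do too.
--     lo, hi = 1, N + 1
--     while lo < hi:
--         mid = (lo + hi) // 2
--         if mid - digit_sum(mid) >= K:
--             hi = mid
--         else:
--             lo = mid + 1
--     return N + 1 - lo
-- ===== Notes on version B (the rewrite author's own statement) =====
-- stated objective: faster
-- what changed: Replaced A's linear scan of 1..N (with a string-based digit sum) by a binary search for the first number with num - digitsum(num) >= K, exploiting that this map is monotone non-decreasing, with an arithmetic digit sum; the answer is N+1 minus that threshold.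
import Mathlib
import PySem

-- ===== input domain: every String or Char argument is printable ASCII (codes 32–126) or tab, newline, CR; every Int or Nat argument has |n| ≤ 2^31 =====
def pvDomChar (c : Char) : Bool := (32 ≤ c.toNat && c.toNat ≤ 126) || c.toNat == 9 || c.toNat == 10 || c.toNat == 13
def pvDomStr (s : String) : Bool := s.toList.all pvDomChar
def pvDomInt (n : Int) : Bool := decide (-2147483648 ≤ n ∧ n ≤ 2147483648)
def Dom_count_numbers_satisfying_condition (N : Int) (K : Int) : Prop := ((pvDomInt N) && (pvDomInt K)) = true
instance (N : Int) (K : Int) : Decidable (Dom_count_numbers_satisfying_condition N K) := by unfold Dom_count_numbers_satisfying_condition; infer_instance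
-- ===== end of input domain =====

-- B replaces A's linear scan of [1, N] by a binary search for the first number with
-- num - digitsum(num) ≥ K (the map is monotone non-decreasing), with an arithmetic digit sum.

-- ===== PORT A =====
-- sum(int(digit) for digit in str(num)); int(digit) never raises here (for num ≥ 1 every
-- char of str(num) is a decimal digit), so the .getD 0 default is never used.
def pvSumOfDigits (num : Int) : Int :=
  ((PySem.Int.toChars num).map (fun c => (PySem.Int.ofChars? [c]).getD 0)).sum

def count_numbers_satisfying_condition (N : Int) (K : Int) : Int :=
  (PySem.List.pyRange 1 (N + 1) 1).foldl
    (fun count num => if num - pvSumOfDigits num ≥ K then count + 1 else count) 0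

-- ===== PORT B =====
-- while n > 0: s += n % 10; n //= 10
def pvDigitSumLoop (n : Int) (s : Int) : Int :=
  if 0 < n then
    pvDigitSumLoop (PySem.Int.floordiv n 10) (s + PySem.Int.mod n 10)
  else s
termination_by n.toNat
decreasing_by
  simp only [PySem.Int.floordiv_eq_ediv_of_pos (by norm_num : (0:Int) < 10)]
  omega

def pvDigitSum (n : Int) : Int := pvDigitSumLoop n 0

-- while lo < hi: mid = (lo+hi)//2; if mid - digit_sum(mid) >= K: hi = mid else: lo = mid+1
def pvBisect (K : Int) (lo : Int) (hi : Int) : Int :=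
  -- mid = (lo + hi) // 2, inlined
  if h : lo < hi then
    if PySem.Int.floordiv (lo + hi) 2 - pvDigitSum (PySem.Int.floordiv (lo + hi) 2) ≥ K then
      pvBisect K lo (PySem.Int.floordiv (lo + hi) 2)
    else pvBisect K (PySem.Int.floordiv (lo + hi) 2 + 1) hi
  else lo
termination_by (hi - lo).toNat
decreasing_by
  · have h1 := (PySem.Int.floordiv_two_mid_bounds (le_of_lt h)).1
    have h2 := PySem.Int.floordiv_lt_iff_lt_mul (a := lo + hi) (b := 2) (q := hi)
        (by norm_num) |>.mpr (by omega)
    omega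
  · have h1 := (PySem.Int.floordiv_two_mid_bounds (le_of_lt h)).1
    omega

def count_numbers_satisfying_condition_alt (N : Int) (K : Int) : Int :=
  if N < 1 then 0 else N + 1 - pvBisect K 1 (N + 1)

-- ===== PRECONDITION & SPEC =====
def Spec_count_numbers_satisfying_condition (N : Int) (K : Int) (out : Int) : Prop := out = count_numbers_satisfying_condition_alt N K
instance (N : Int) (K : Int) (out : Int) : Decidable (Spec_count_numbers_satisfying_condition N K out) := by unfold Spec_count_numbers_satisfying_condition; infer_instance

-- ===== CLAIM (what is proved, stated in full; the proofs are below) =====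
def Claim_equal_count_numbers_satisfying_condition : Prop := ∀ (N : Int) (K : Int), Dom_count_numbers_satisfying_condition N K → Spec_count_numbers_satisfying_condition N K (count_numbers_satisfying_condition N K)

-- ===== LEMMAS AND PROOFS =====

-- Proof-side digit sum (no accumulator), in terms of Lean's ediv/emod.
def pvD (n : Int) : Int :=
  if 0 < n then n % 10 + pvD (n / 10) else 0
termination_by n.toNat
decreasing_by omega

theorem pvDigitSumLoop_eq (n : Int) : ∀ s : Int, pvDigitSumLoop n s = s + pvD n := by
  induction n using pvD.induct with
  | case1 n hn ih =>
    intro s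
    rw [pvDigitSumLoop, pvD, if_pos hn, if_pos hn,
      PySem.Int.floordiv_eq_ediv_of_pos (by norm_num : (0:Int) < 10),
      PySem.Int.mod_eq_emod_of_pos (by norm_num : (0:Int) < 10), ih]
    ring
  | case2 n hn =>
    intro s
    rw [pvDigitSumLoop, pvD, if_neg hn, if_neg hn]
    ring

theorem pvDigitSum_eq (n : Int) : pvDigitSum n = pvD n := by
  rw [pvDigitSum, pvDigitSumLoop_eq]; ring

theorem pvD_pos (n : Int) (h : 0 < n) : pvD n = n % 10 + pvD (n / 10) := by
  rw [pvD, if_pos h]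

theorem pvD_nonpos (n : Int) (h : ¬ 0 < n) : pvD n = 0 := by
  rw [pvD, if_neg h]

theorem pvD_le (n : Int) (h : 0 ≤ n) : pvD n ≤ n := by
  induction n using pvD.induct with
  | case1 n hn ih =>
    have := ih (by omega)
    rw [pvD_pos n hn]; omega
  | case2 n hn => rw [pvD_nonpos n hn]; omega

theorem pvD_succ_le (n : Int) (hn : 0 ≤ n) : pvD (n + 1) ≤ pvD n + 1 := by
  induction n using pvD.induct with
  | case1 n hpos ih =>
    rw [pvD_pos (n + 1) (by omega), pvD_pos n hpos]
    by_cases h9 : n % 10 = 9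
    · have hdiv : (n + 1) / 10 = n / 10 + 1 := by omega
      have hmod : (n + 1) % 10 = 0 := by omega
      have := ih (by omega)
      rw [hdiv, hmod]
      omega
    · have hdiv : (n + 1) / 10 = n / 10 := by omega
      have hmod : (n + 1) % 10 = n % 10 + 1 := by omega
      rw [hdiv, hmod]
      omega
  | case2 n hpos =>
    have hn0 : n = 0 := by omega
    subst hn0
    have h1 : pvD 1 = 1 := by
      rw [pvD_pos 1 one_pos]
      norm_num [pvD_nonpos 0 (by norm_num)]
    rw [pvD_nonpos 0 (by norm_num), show (0:Int) + 1 = 1 by norm_num, h1]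

-- n - pvD n is monotone non-decreasing.
theorem pvD_mono (m n : Int) (h : m ≤ n) : m - pvD m ≤ n - pvD n := by
  by_cases hm : 0 ≤ m
  · induction n, h using Int.le_induction with
    | base => omega
    | succ k hk ih =>
      have := pvD_succ_le k (by omega)
      omega
  · have hDm : pvD m = 0 := pvD_nonpos m (by omega)
    by_cases hn : 0 ≤ n
    · have h1 := pvD_le n hn
      omega
    · have hDn : pvD n = 0 := pvD_nonpos n (by omega)
      omega

-- char value as A computes it
theorem pv_chv_digitChar (r : Nat) (hr : r < 10) :
    (PySem.Int.ofChars? [Nat.digitChar r]).getD 0 = (r : Int) := by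
  interval_cases r <;> decide

theorem pvD_natCast_unfold (n : Nat) (hn : 0 < n) :
    pvD (n : Int) = ((n % 10 : Nat) : Int) + pvD ((n / 10 : Nat) : Int) := by
  rw [pvD, if_pos (by exact_mod_cast hn)]
  push_cast
  rfl

theorem pv_core_sum (f : Nat) : ∀ (n : Nat) (acc : List Char), n < f →
    ((Nat.toDigitsCore 10 f n acc).map (fun c => (PySem.Int.ofChars? [c]).getD 0)).sum
      = pvD (n : Int) + ((acc.map (fun c => (PySem.Int.ofChars? [c]).getD 0)).sum) := by
  induction f with
  | zero => intro n acc h; omega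
  | succ f ih =>
    intro n acc h
    rw [Nat.toDigitsCore]
    by_cases h0 : n / 10 = 0
    · rw [if_pos h0]
      by_cases hn : n = 0
      · subst hn
        simp only [Nat.cast_zero, pvD_nonpos 0 (by norm_num)]
        simp
        decide
      · rw [pvD_natCast_unfold n (by omega), h0]
        rw [pvD_nonpos ((0:Nat) : Int) (by norm_num)]
        simp [pv_chv_digitChar (n % 10) (Nat.mod_lt _ (by norm_num))]
    · rw [if_neg h0]
      rw [ih (n / 10) _ (by omega)]
      rw [pvD_natCast_unfold n (by omega)]
      simp [pv_chv_digitChar (n % 10) (Nat.mod_lt _ (by norm_num))]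
      ring

-- bridge: A's string digit sum equals pvD on positive inputs
theorem pvSumOfDigits_eq (num : Int) (h : 1 ≤ num) : pvSumOfDigits num = pvD num := by
  rw [pvSumOfDigits, PySem.Int.toChars, if_neg (by omega), Nat.toDigits]
  rw [pv_core_sum (num.toNat + 1) num.toNat [] (by omega)]
  simp [Int.toNat_of_nonneg (by omega : (0:Int) ≤ num)]

-- binary search specification
theorem pvBisect_spec (K lo hi : Int) (h : lo ≤ hi) :
    lo ≤ pvBisect K lo hi ∧ pvBisect K lo hi ≤ hi ∧
    (∀ x, lo ≤ x → x < pvBisect K lo hi → ¬ (K ≤ x - pvD x)) ∧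
    (∀ x, pvBisect K lo hi ≤ x → x < hi → K ≤ x - pvD x) := by
  induction lo, hi using pvBisect.induct K with
  | case1 lo hi hlt hcond ih =>
    rw [pvBisect, dif_pos hlt, if_pos hcond]
    have hmid := PySem.Int.floordiv_two_mid_bounds (le_of_lt hlt)
    have hmlt : PySem.Int.floordiv (lo + hi) 2 < hi :=
      (PySem.Int.floordiv_lt_iff_lt_mul (by norm_num)).mpr (by omega)
    obtain ⟨i1, i2, i3, i4⟩ := ih hmid.1
    refine ⟨i1, by omega, i3, fun x hx1 hx2 => ?_⟩
    by_cases hxm : x < PySem.Int.floordiv (lo + hi) 2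
    · exact i4 x hx1 hxm
    · have hc : K ≤ PySem.Int.floordiv (lo + hi) 2 - pvD (PySem.Int.floordiv (lo + hi) 2) := by
        rw [pvDigitSum_eq] at hcond; omega
      have := pvD_mono (PySem.Int.floordiv (lo + hi) 2) x (by omega)
      omega
  | case2 lo hi hlt hcond ih =>
    rw [pvBisect, dif_pos hlt, if_neg hcond]
    have hmid := PySem.Int.floordiv_two_mid_bounds (le_of_lt hlt)
    have hmlt : PySem.Int.floordiv (lo + hi) 2 < hi :=
      (PySem.Int.floordiv_lt_iff_lt_mul (by norm_num)).mpr (by omega)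
    obtain ⟨i1, i2, i3, i4⟩ := ih (by omega)
    refine ⟨by omega, i2, fun x hx1 hx2 => ?_, i4⟩
    by_cases hxm : PySem.Int.floordiv (lo + hi) 2 + 1 ≤ x
    · exact i3 x hxm hx2
    · have hc : ¬ K ≤ PySem.Int.floordiv (lo + hi) 2 - pvD (PySem.Int.floordiv (lo + hi) 2) := by
        rw [pvDigitSum_eq] at hcond; omega
      have := pvD_mono x (PySem.Int.floordiv (lo + hi) 2) (by omega)
      omega
  | case3 lo hi hlt =>
    rw [pvBisect, dif_neg hlt]
    exact ⟨le_refl _, h, fun x hx1 hx2 => by omega, fun x hx1 hx2 => by omega⟩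

-- ===== VERDICT (by name: the statement is the Claim_ definition above) =====
theorem count_numbers_satisfying_condition_spec : Claim_equal_count_numbers_satisfying_condition := by
  intro N K _
  unfold Spec_count_numbers_satisfying_condition
  unfold count_numbers_satisfying_condition count_numbers_satisfying_condition_alt
  by_cases hN : N < 1
  · rw [if_pos hN, PySem.List.pyRange_one_eq_nil (by omega)]
    rfl
  · rw [if_neg hN]
    set t := pvBisect K 1 (N + 1) with ht
    obtain ⟨h1, h2, h3, h4⟩ := pvBisect_spec K 1 (N + 1) (by omega)
    have hconv :
        (PySem.List.pyRange 1 (N + 1) 1).foldl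
          (fun count num => if num - pvSumOfDigits num ≥ K then count + 1 else count) 0
        = ((PySem.List.pyRange 1 (N + 1) 1).countP
            (fun num => decide (K ≤ num - pvD num)) : Int) := by
      have := PySem.List.foldl_count_if
        (fun num => decide (K ≤ num - pvSumOfDigits num)) (PySem.List.pyRange 1 (N + 1) 1) 0
      simp only [decide_eq_true_eq] at this
      simp only [ge_iff_le]
      rw [this, zero_add]
      congr 1
      refine List.countP_congr (fun x hx => ?_)
      have hx1 := (PySem.List.mem_pyRange_one.mp hx).1
      simp [pvSumOfDigits_eq x hx1]
    rw [hconv]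
    rw [PySem.List.pyRange_one_append 1 t (N + 1) h1 h2, List.countP_append]
    have hz : (PySem.List.pyRange 1 t 1).countP (fun num => decide (K ≤ num - pvD num)) = 0 := by
      rw [List.countP_eq_zero]
      intro x hx
      have := PySem.List.mem_pyRange_one.mp hx
      simpa using h3 x this.1 this.2
    have hf : (PySem.List.pyRange t (N + 1) 1).countP (fun num => decide (K ≤ num - pvD num))
        = (PySem.List.pyRange t (N + 1) 1).length := by
      rw [List.countP_eq_length]
      intro x hx
      have := PySem.List.mem_pyRange_one.mp hx
      simpa using h4 x this.1 this.2
    rw [hz, hf, PySem.List.length_pyRange_one]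
    omega
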